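-- pv_equiv track=rewrite | github.com/jakos260/My | LAB/PMKOI/pythonProject/P1/1_7.py | func7
-- ===== SOURCE A (Python) =====
-- def func7(arg):
--     dict = {}
--     lista = list(arg)
--     for i in range(1, len(lista)+1):
--         l_p = []
--         for j in range(1, len(lista)+1):
--             if(i != j):
--                 l_p.append(j)
--         k_p = tuple(l_p)
--         dict[i] = k_p
--     return dict
-- ===== SOURCE B (Python) =====
-- def func7(arg):
--     vals = {}
--     for m in range(1, len(list(arg)) + 1):
--         for v in vals.values():
--             v.append(m)
--         vals[m] = list(range(1, m))
--     return {k: tuple(v) for k, v in vals.items()}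
-- ===== Notes on version B (the rewrite author's own statement) =====
-- stated objective: alternative
-- what changed: Replaces the nested skip-one loop with an incremental (dynamic-programming) construction: the table for the first m indices is built from the table for m-1 by appending m to every existing value and adding the new key m mapped to tuple(range(1, m)), so no per-pair equality test exists anywhere.
import Mathlib
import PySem

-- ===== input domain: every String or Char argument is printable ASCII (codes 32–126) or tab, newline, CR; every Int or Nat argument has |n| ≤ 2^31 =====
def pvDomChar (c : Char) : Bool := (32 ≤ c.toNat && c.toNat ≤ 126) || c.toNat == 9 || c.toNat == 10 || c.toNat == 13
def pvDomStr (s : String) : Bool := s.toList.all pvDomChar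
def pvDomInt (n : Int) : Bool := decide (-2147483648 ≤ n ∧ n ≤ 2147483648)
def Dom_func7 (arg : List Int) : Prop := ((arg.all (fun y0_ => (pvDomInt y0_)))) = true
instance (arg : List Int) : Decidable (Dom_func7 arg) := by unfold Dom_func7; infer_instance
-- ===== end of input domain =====

-- B builds the table incrementally: each step extends every previous value with the new index m and adds key m ↦ (1..m-1); no skip-one test (objective: alternative).

-- ===== PORT A =====
def func7 (arg : List Int) : List (Int × List Int) :=
  let lista := arg
  let d := (PySem.List.pyRange 1 ((lista.length : Int) + 1) 1).foldl
    (fun d i =>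
      let l_p := (PySem.List.pyRange 1 ((lista.length : Int) + 1) 1).foldl
        (fun l j => if i ≠ j then l ++ [j] else l) []
      d.insert i l_p)
    (PySem.Dict.empty)
  d.items

-- ===== PORT B =====
def func7_alt (arg : List Int) : List (Int × List Int) :=
  let vals := (PySem.List.pyRange 1 ((arg.length : Int) + 1) 1).foldl
    (fun vals m =>
      -- 'for v in vals.values(): v.append(m)': append m to every value in place — keys and order unchanged (exact)
      let vals := PySem.Dict.mk (vals.items.map (fun kv => (kv.1, kv.2 ++ [m])))
      vals.insert m (PySem.List.pyRange 1 m 1))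
    (PySem.Dict.empty : PySem.Dict Int (List Int))
  -- '{k: tuple(v) for k, v in vals.items()}' (tuple(v) is the identity on List Int here)
  (vals.items.foldl (fun acc kv => acc.insert kv.1 kv.2) PySem.Dict.empty).items

-- ===== PRECONDITION & SPEC =====
def Spec_func7 (arg : List Int) (out : List (Int × List Int)) : Prop := out = func7_alt arg
instance (arg : List Int) (out : List (Int × List Int)) : Decidable (Spec_func7 arg out) := by unfold Spec_func7; infer_instance

-- ===== CLAIM (what is proved, stated in full; the proofs are below) =====
def Claim_equal_func7 : Prop := ∀ (arg : List Int), Dom_func7 arg → Spec_func7 arg (func7 arg)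

-- ===== LEMMAS AND PROOFS =====

-- B's fold over 1..k yields exactly the table mapping each i to 1..k without i
theorem alt_fold_invariant (k : Nat) :
    ((PySem.List.pyRange 1 ((k : Int) + 1) 1).foldl
      (fun vals m =>
        (PySem.Dict.mk (vals.items.map (fun kv => (kv.1, kv.2 ++ [m])))).insert
          m (PySem.List.pyRange 1 m 1))
      (PySem.Dict.empty : PySem.Dict Int (List Int))).items
    = (PySem.List.pyRange 1 ((k : Int) + 1) 1).map
        (fun i => (i, (PySem.List.pyRange 1 ((k : Int) + 1) 1).filter (fun j => decide (i ≠ j)))) := by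
  induction k with
  | zero =>
    rw [PySem.List.pyRange_one_eq_nil (by omega)]
    simp [PySem.Dict.empty]
  | succ k ih =>
    have hsplit : PySem.List.pyRange 1 ((k : Int) + 1 + 1) 1
        = PySem.List.pyRange 1 ((k : Int) + 1) 1 ++ [((k : Int) + 1)] := by
      exact PySem.List.pyRange_one_succ_right (by omega : (1 : Int) ≤ (k : Int) + 1)
    have hpush : ((k + 1 : Nat) : Int) = (k : Int) + 1 := by push_cast; ring
    rw [hpush, hsplit, List.foldl_append]
    simp only [List.foldl_cons, List.foldl_nil]
    rw [ih]
    -- the insert of the new key k+1 is fresh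
    rw [PySem.Dict.items_insert]
    have hnc : (PySem.Dict.mk
        (((PySem.List.pyRange 1 ((k : Int) + 1) 1).map
            (fun i => (i, (PySem.List.pyRange 1 ((k : Int) + 1) 1).filter (fun j => decide (i ≠ j))))).map
          (fun kv => (kv.1, kv.2 ++ [((k : Int) + 1)])))).contains ((k : Int) + 1) = false := by
      rw [PySem.Dict.contains_eq_decide_mem_keys]
      simp only [PySem.Dict.keys_mk, List.map_map, decide_eq_false_iff_not, List.mem_map,
        Function.comp, PySem.List.mem_pyRange_one, not_exists, not_and]
      intro i hi
      omega
    rw [hnc]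
    simp only [Bool.false_eq_true, if_false]
    simp only [List.map_map, List.map_append]
    congr 1
    · -- old keys: value for i over 1..k+1 = value over 1..k with k+1 appended
      apply List.map_congr_left
      intro i hi
      rw [PySem.List.mem_pyRange_one] at hi
      simp only [Function.comp]
      refine congrArg (Prod.mk i) ?_
      rw [List.filter_append]
      congr 1
      simp only [List.filter_cons, List.filter_nil]
      have hne : decide (i ≠ (k : Int) + 1) = true := by
        simp only [decide_eq_true_eq]; omega
      rw [hne]
      simp
    · -- new key k+1: filter of 1..k+1 by ≠ k+1 is 1..k
      simp only [List.map_cons, List.map_nil, List.cons.injEq, and_true]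
      rw [List.filter_append]
      have h1 : (PySem.List.pyRange 1 ((k : Int) + 1) 1).filter
          (fun j => decide ((k : Int) + 1 ≠ j)) = PySem.List.pyRange 1 ((k : Int) + 1) 1 := by
        apply List.filter_eq_self.mpr
        intro a ha
        rw [PySem.List.mem_pyRange_one] at ha
        simp only [decide_eq_true_eq]
        omega
      rw [h1]
      simp

-- the final identity dict comprehension over distinct keys keeps the items list
theorem items_rebuild (L : List (Int × List Int)) (h : (L.map (fun kv => kv.1)).Nodup) :
    (L.foldl (fun acc kv => acc.insert kv.1 kv.2) PySem.Dict.empty).items = L := by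
  rw [PySem.Dict.items_foldl_insert_fresh _ (fun kv : Int × List Int => kv.1)
      (fun kv : Int × List Int => kv.2) _ (fun a _ => PySem.Dict.contains_empty _) h]
  simp [PySem.Dict.empty]

-- the keys of the invariant's table are exactly 1..n, hence Nodup
theorem nodup_table_keys (n : Nat) :
    (((PySem.List.pyRange 1 ((n : Int) + 1) 1).map
        (fun i => (i, (PySem.List.pyRange 1 ((n : Int) + 1) 1).filter (fun j => decide (i ≠ j))))).map
      (fun kv : Int × List Int => kv.1)).Nodup := by
  rw [List.map_map]
  have hcomp : ((fun kv : Int × List Int => kv.1) ∘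
      (fun i : Int => (i, (PySem.List.pyRange 1 ((n : Int) + 1) 1).filter (fun j => decide (i ≠ j)))))
      = id := by funext i; rfl
  rw [hcomp, List.map_id]
  exact PySem.List.nodup_pyRange_one 1 ((n : Int) + 1)

-- ===== VERDICT (by name: the statement is the Claim_ definition above) =====
theorem func7_spec : Claim_equal_func7 := by
  intro arg _
  unfold Spec_func7 func7 func7_alt
  simp only []
  rw [alt_fold_invariant arg.length, items_rebuild _ (nodup_table_keys arg.length)]
  rw [PySem.Dict.items_foldl_insert_fresh _ (fun i => i) _ _
      (fun a _ => PySem.Dict.contains_empty a)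
      (by simpa using PySem.List.nodup_pyRange_one 1 ((arg.length : Int) + 1))]
  simp only [PySem.Dict.empty, List.nil_append]
  apply List.map_congr_left
  intro i _
  refine congrArg (Prod.mk i) ?_
  rw [PySem.List.foldl_append_ite_eq_filter]
  simp
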